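-- pv_equiv track=rewrite | github.com/MarkvanManen/School | Les04/opdracht4_4.py | new_password
-- ===== SOURCE A (Python) =====
-- cijferlijst = ['0', '1', '2', '3', '4', '5', '6', '7', '8', '9']
--
-- def new_password(oldpassword, newpassword):
--     cijferinpassword = False
--     for nummer in cijferlijst:
--         if nummer in newpassword:
--             cijferinpassword = True
--     if oldpassword != newpassword and len(newpassword) >= 6 and cijferinpassword:
--         return True
--     else:
--         return False
-- ===== SOURCE B (Python) =====
-- def new_password(oldpassword, newpassword):
--     has_digit = any(c in '0123456789' for c in newpassword)
--     return oldpassword != newpassword and len(newpassword) >= 6 and has_digit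
-- ===== Notes on version B (the rewrite author's own statement) =====
-- stated objective: idiomatic
-- what changed: Replaces the loop over the ten digit strings (each doing a substring scan of newpassword) with a single any() pass over newpassword's characters testing membership in the digit set, and returns the boolean conjunction directly instead of the if/else.
import Mathlib
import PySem

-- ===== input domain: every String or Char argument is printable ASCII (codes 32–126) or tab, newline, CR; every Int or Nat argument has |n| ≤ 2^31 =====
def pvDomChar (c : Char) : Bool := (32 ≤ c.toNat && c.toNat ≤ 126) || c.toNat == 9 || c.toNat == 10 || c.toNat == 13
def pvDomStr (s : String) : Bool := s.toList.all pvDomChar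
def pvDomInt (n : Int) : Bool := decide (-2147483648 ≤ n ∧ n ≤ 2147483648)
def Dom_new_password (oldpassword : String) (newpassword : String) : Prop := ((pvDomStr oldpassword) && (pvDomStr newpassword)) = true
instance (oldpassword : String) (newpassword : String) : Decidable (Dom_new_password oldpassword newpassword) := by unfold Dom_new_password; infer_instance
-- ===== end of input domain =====

-- B replaces A's loop over the ten digit strings (each a substring scan of newpassword)
-- with one any() pass over newpassword's characters, returning the conjunction directly (idiomatic).

-- ===== PORT A =====
def cijferlijst : List String := ["0", "1", "2", "3", "4", "5", "6", "7", "8", "9"]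

def new_password (oldpassword : String) (newpassword : String) : Bool :=
  let cijferinpassword :=
    cijferlijst.foldl (fun acc nummer => if PySem.Str.isIn nummer newpassword then true else acc) false
  if oldpassword ≠ newpassword ∧ (PySem.Str.len newpassword : Int) ≥ 6 ∧ cijferinpassword = true then
    true
  else
    false

-- ===== PORT B =====
-- `c in '0123456789'` for a single character c is membership among the digit characters (exact here)
def new_password_alt (oldpassword : String) (newpassword : String) : Bool :=
  let has_digit := newpassword.toList.any (fun c => ("0123456789".toList).contains c)
  decide (oldpassword ≠ newpassword) && decide ((PySem.Str.len newpassword : Int) ≥ 6) && has_digit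

-- ===== PRECONDITION & SPEC =====
def Spec_new_password (oldpassword : String) (newpassword : String) (out : Bool) : Prop := out = new_password_alt oldpassword newpassword
instance (oldpassword : String) (newpassword : String) (out : Bool) : Decidable (Spec_new_password oldpassword newpassword out) := by unfold Spec_new_password; infer_instance

-- ===== CLAIM (what is proved, stated in full; the proofs are below) =====
def Claim_equal_new_password : Prop := ∀ (oldpassword : String) (newpassword : String), Dom_new_password oldpassword newpassword → Spec_new_password oldpassword newpassword (new_password oldpassword newpassword)

-- ===== LEMMAS AND PROOFS =====

theorem singleton_infix {c : Char} {l : List Char} : [c] <:+: l ↔ c ∈ l := by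
  constructor
  · intro h; exact List.singleton_sublist.mp h.sublist
  · intro h; obtain ⟨s, t, rfl⟩ := List.append_of_mem h; exact ⟨s, t, by simp⟩

theorem isIn_singleton (c : Char) (s : String) :
    PySem.Str.isIn (String.ofList [c]) s = s.toList.contains c := by
  rcases h : s.toList.contains c with _|_
  · rcases h2 : PySem.Str.isIn (String.ofList [c]) s with _|_
    · rfl
    · have h3 := (PySem.Str.isIn_iff_infix _ _).mp h2
      simp at h3
      rw [singleton_infix] at h3
      simp [List.contains_eq_mem, h3] at h
  · apply (PySem.Str.isIn_iff_infix _ _).mpr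
    simp
    rw [singleton_infix]
    simpa [List.contains_eq_mem] using h

theorem fold_or (s : String) (ds : List String) (acc : Bool) :
    ds.foldl (fun acc n => if PySem.Str.isIn n s then true else acc) acc
      = (acc || ds.any (fun n => PySem.Str.isIn n s)) := by
  induction ds generalizing acc with
  | nil => simp
  | cons d ds ih =>
    simp only [List.foldl, List.any_cons, ih]
    cases h : PySem.Str.isIn d s <;> simp [h]

theorem any_comm (l ds : List Char) :
    ds.any (fun d => l.contains d) = l.any (fun c => ds.contains c) := by
  rw [Bool.eq_iff_iff]
  simp only [List.any_eq_true, List.contains_eq_mem, decide_eq_true_eq]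
  exact ⟨fun ⟨d, h1, h2⟩ => ⟨d, h2, h1⟩, fun ⟨c, h1, h2⟩ => ⟨c, h2, h1⟩⟩

theorem digits_any (s : String) :
    cijferlijst.any (fun n => PySem.Str.isIn n s)
      = s.toList.any (fun c => ("0123456789".toList).contains c) := by
  rw [← any_comm]
  simp only [cijferlijst, List.any_cons, List.any_nil,
    show ("0123456789" : String).toList = ['0','1','2','3','4','5','6','7','8','9'] by simp,
    show ("0" : String) = String.ofList ['0'] from rfl,
    show ("1" : String) = String.ofList ['1'] from rfl,
    show ("2" : String) = String.ofList ['2'] from rfl,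
    show ("3" : String) = String.ofList ['3'] from rfl,
    show ("4" : String) = String.ofList ['4'] from rfl,
    show ("5" : String) = String.ofList ['5'] from rfl,
    show ("6" : String) = String.ofList ['6'] from rfl,
    show ("7" : String) = String.ofList ['7'] from rfl,
    show ("8" : String) = String.ofList ['8'] from rfl,
    show ("9" : String) = String.ofList ['9'] from rfl,
    isIn_singleton]

-- ===== VERDICT (by name: the statement is the Claim_ definition above) =====
theorem new_password_spec : Claim_equal_new_password := by
  intro o n _
  unfold Spec_new_password new_password new_password_alt
  simp only [fold_or, Bool.false_or, digits_any]
  by_cases h1 : o ≠ n <;>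
    by_cases h2 : (PySem.Str.len n : Int) ≥ 6 <;>
      cases h3 : n.toList.any (fun c => ("0123456789".toList).contains c) <;>
        simp [h1, h2, h3]
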